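-- pv_equiv track=rewrite | github.com/scrumdogmillionaire11/cheddar-logic | cheddar-fpl-sage/src/cheddar_fpl_sage/analysis/fixture_difficulty.py | get_current_gw
-- ===== SOURCE A (Python) =====
-- from typing import Any, Dict, List, Tuple
--
-- def get_current_gw(bootstrap_data: Dict[str, Any]) -> int:
--     """Return the current gameweek, falling back to the next scheduled event."""
--     events = bootstrap_data.get("events") or []
--
--     for event in events:
--         if event.get("is_current"):
--             return int(event.get("id") or 1)
--
--     for event in events:
--         if event.get("is_next"):
--             return int(event.get("id") or 1)
--
--     return 1
-- ===== SOURCE B (Python) =====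
-- def get_current_gw(bootstrap_data):
--     """Single pass: return immediately on the current event; remember the first
--     'next' event and fall back to it (or 1) after the loop."""
--     pending_next = None
--     for event in (bootstrap_data.get("events") or []):
--         if event.get("is_current"):
--             return int(event.get("id") or 1)
--         if pending_next is None and event.get("is_next"):
--             pending_next = int(event.get("id") or 1)
--     return 1 if pending_next is None else pending_next
-- ===== Notes on version B (the rewrite author's own statement) =====
-- stated objective: alternative
-- what changed: Replaces A's two priority scans over events with one pass that returns on the first current event and carries the first next-event id as a pending fallback.
import Mathlib
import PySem

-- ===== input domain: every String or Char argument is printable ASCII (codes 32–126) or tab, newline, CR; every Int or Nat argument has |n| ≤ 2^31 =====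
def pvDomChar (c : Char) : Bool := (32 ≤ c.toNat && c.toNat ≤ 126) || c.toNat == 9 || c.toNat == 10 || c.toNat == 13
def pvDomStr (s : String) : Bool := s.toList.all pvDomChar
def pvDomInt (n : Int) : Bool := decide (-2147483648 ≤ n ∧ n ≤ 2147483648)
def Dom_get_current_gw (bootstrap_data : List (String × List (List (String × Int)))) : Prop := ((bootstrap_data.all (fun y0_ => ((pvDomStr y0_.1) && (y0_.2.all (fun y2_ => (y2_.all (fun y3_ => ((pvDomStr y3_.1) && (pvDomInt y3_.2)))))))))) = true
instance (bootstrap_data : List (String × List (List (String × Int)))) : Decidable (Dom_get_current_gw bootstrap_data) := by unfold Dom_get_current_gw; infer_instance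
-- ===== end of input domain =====

-- ===== PORT A =====
-- B changes: one pass carrying a pending next-id instead of A's two priority scans (alternative decomposition).
-- shared helper: Python dict.get on the association-list encoding (first match)
def pvLookup {α : Type} (d : List (String × α)) (k : String) : Option α :=
  match d with
  | [] => none
  | (k', v) :: rest => if k' == k then some v else pvLookup rest k

-- truthiness of event.get(key): missing or 0 is falsy
def pvTruthy (e : List (String × Int)) (k : String) : Bool :=
  match pvLookup e k with
  | none => false
  | some v => v != 0

-- int(event.get("id") or 1)
def pvIdOr1 (e : List (String × Int)) : Int :=
  match pvLookup e "id" with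
  | none => 1
  | some v => if v = 0 then 1 else v

-- bootstrap_data.get("events") or []
def pvEvents (bootstrap_data : List (String × List (List (String × Int)))) : List (List (String × Int)) :=
  (pvLookup bootstrap_data "events").getD []

-- A's second loop: first event with truthy "is_next", else 1
def loopA2 (events : List (List (String × Int))) : Int :=
  match events with
  | [] => 1
  | e :: es => if pvTruthy e "is_next" then pvIdOr1 e else loopA2 es

-- A's first loop: first event with truthy "is_current", else fall through to the second scan
def loopA1 (allEvents rest : List (List (String × Int))) : Int :=
  match rest with
  | [] => loopA2 allEvents
  | e :: es => if pvTruthy e "is_current" then pvIdOr1 e else loopA1 allEvents es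

def get_current_gw (bootstrap_data : List (String × List (List (String × Int)))) : Int :=
  let events := pvEvents bootstrap_data
  loopA1 events events

-- ===== PORT B =====
-- B's single loop with a pending next-id
def loopB (pending : Option Int) (events : List (List (String × Int))) : Int :=
  match events with
  | [] => match pending with | none => 1 | some v => v
  | e :: es =>
    if pvTruthy e "is_current" then pvIdOr1 e
    else loopB (if pending.isNone && pvTruthy e "is_next" then some (pvIdOr1 e) else pending) es

def get_current_gw_alt (bootstrap_data : List (String × List (List (String × Int)))) : Int :=
  loopB none (pvEvents bootstrap_data)

-- ===== PRECONDITION & SPEC =====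
def Spec_get_current_gw (bootstrap_data : List (String × List (List (String × Int)))) (out : Int) : Prop := out = get_current_gw_alt bootstrap_data
instance (bootstrap_data : List (String × List (List (String × Int)))) (out : Int) : Decidable (Spec_get_current_gw bootstrap_data out) := by unfold Spec_get_current_gw; infer_instance

-- ===== CLAIM (what is proved, stated in full; the proofs are below) =====
def Claim_equal_get_current_gw : Prop := ∀ (bootstrap_data : List (String × List (List (String × Int)))), Dom_get_current_gw bootstrap_data → Spec_get_current_gw bootstrap_data (get_current_gw bootstrap_data)

-- ===== LEMMAS AND PROOFS =====
-- proof-only helper: A's current-scan with an explicit fall-through value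
def loopA1' (rest : List (List (String × Int))) (fb : Int) : Int :=
  match rest with
  | [] => fb
  | e :: es => if pvTruthy e "is_current" then pvIdOr1 e else loopA1' es fb

-- B's loop, from any pending state, equals: first current event's id, else the pending value, else A's next-scan.
theorem loopB_eq (pending : Option Int) (es : List (List (String × Int))) :
    loopB pending es =
      loopA1' es (match pending with | none => loopA2 es | some v => v) := by
  induction es generalizing pending with
  | nil => cases pending <;> simp [loopB, loopA1', loopA2]
  | cons e es ih =>
    by_cases hc : pvTruthy e "is_current" = true
    · simp [loopB, loopA1', hc]
    · cases pending with
      | some v => simp [loopB, loopA1', hc, ih]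
      | none =>
        by_cases hn : pvTruthy e "is_next" = true
        · simp [loopB, loopA1', loopA2, hc, hn, ih]
        · simp [loopB, loopA1', loopA2, hc, hn, ih]

-- A's first loop rephrased with the fall-through value as a parameter
theorem loopA1_eq (allEvents rest : List (List (String × Int))) :
    loopA1 allEvents rest = loopA1' rest (loopA2 allEvents) := by
  induction rest with
  | nil => simp [loopA1, loopA1']
  | cons e es ih => by_cases h : pvTruthy e "is_current" = true <;> simp [loopA1, loopA1', h, ih]

-- If no current event occurs in a prefix, the fall-through from the full list equals that from the rest? Not needed:
-- A scans allEvents from the start both times, and B's pending after the (current-free) prefix is exactly what loopA2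
-- would pick there; loopB_eq already internalises that.  Main step:
theorem loops_agree (events : List (List (String × Int))) :
    loopA1 events events = loopB none events := by
  rw [loopA1_eq, loopB_eq]

-- ===== VERDICT (by name: the statement is the Claim_ definition above) =====
theorem get_current_gw_spec : Claim_equal_get_current_gw := by
  intro bd _
  unfold Spec_get_current_gw get_current_gw get_current_gw_alt
  exact loops_agree (pvEvents bd)
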